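-- pv_equiv track=rewrite | github.com/Sankalp1729/Assignment | backend/utils/image_extractor.py | organize_images_by_type
-- ===== SOURCE A (Python) =====
-- from typing import Dict, List, Any, Tuple
--
-- def organize_images_by_type(
--     images: List[Dict[str, Any]]
-- ) -> Dict[str, List[Dict[str, Any]]]:
--     """
--     Organize images by type/category.
--
--     Returns:
--         Dictionary with images grouped by category
--     """
--     organized = {
--         "thermal": [],
--         "structural": [],
--         "moisture": [],
--         "other": [],
--     }
--
--     for image in images:
--         description = image.get("description", "").lower()
--
--         if "thermal" in description:
--             organized["thermal"].append(image)
--         elif "crack" in description or "structural" in description: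
--             organized["structural"].append(image)
--         elif "water" in description or "moisture" in description or "damp" in description:
--             organized["moisture"].append(image)
--         else:
--             organized["other"].append(image)
--
--     return organized
-- ===== SOURCE B (Python) =====
-- from typing import Dict, List, Any
--
-- def organize_images_by_type(
--     images: List[Dict[str, Any]]
-- ) -> Dict[str, List[Dict[str, Any]]]:
--     """Data-table version: classify each image via an ordered rules table,
--     then build each category's list with a comprehension."""
--     rules = [
--         ("thermal", ["thermal"]),
--         ("structural", ["crack", "structural"]),
--         ("moisture", ["water", "moisture", "damp"]),
--     ]
--
--     def category(image):
--         desc = image.get("description", "").lower()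
--         return next((cat for cat, kws in rules if any(k in desc for k in kws)), "other")
--
--     return {cat: [img for img in images if category(img) == cat]
--             for cat in ("thermal", "structural", "moisture", "other")}
-- ===== Notes on version B (the rewrite author's own statement) =====
-- stated objective: idiomatic
-- what changed: Replaces the hard-coded if/elif cascade and in-place appends with an ordered keyword rules table, a classify helper, and a dict comprehension that builds each category's list by filtering.
import Mathlib
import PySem

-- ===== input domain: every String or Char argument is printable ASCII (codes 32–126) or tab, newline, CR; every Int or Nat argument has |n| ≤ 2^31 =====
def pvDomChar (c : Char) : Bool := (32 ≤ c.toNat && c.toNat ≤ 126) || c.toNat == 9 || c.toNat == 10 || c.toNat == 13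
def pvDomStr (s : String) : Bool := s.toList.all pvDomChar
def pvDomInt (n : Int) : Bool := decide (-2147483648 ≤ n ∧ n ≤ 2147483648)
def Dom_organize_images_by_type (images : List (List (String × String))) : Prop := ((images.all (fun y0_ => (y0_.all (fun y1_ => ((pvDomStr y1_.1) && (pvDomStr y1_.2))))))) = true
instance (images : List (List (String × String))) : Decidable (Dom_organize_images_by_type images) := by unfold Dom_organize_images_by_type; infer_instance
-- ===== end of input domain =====

-- B replaces A's hard-coded if/elif cascade with an ordered keyword rules table, a classify
-- helper, and a per-category filter (same O(n) cost; objective: idiomatic/data-driven).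

-- ===== PORT A =====
-- description = image.get("description", "").lower()   (shared by both ports, as in both Pythons)
def orgDesc (image : List (String × String)) : String :=
  PySem.Str.lower ((PySem.Dict.mk image).getD "description" "")

-- the body of A's for-loop: the if/elif cascade appending to organized[...]
def orgStepA (d : PySem.Dict String (List (List (String × String)))) (image : List (String × String)) : PySem.Dict String (List (List (String × String))) :=
  let description := orgDesc image
  if PySem.Str.isIn "thermal" description then
    d.modify "thermal" [] (fun l => l ++ [image])
  else if PySem.Str.isIn "crack" description || PySem.Str.isIn "structural" description then
    d.modify "structural" [] (fun l => l ++ [image])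
  else if PySem.Str.isIn "water" description || PySem.Str.isIn "moisture" description || PySem.Str.isIn "damp" description then
    d.modify "moisture" [] (fun l => l ++ [image])
  else
    d.modify "other" [] (fun l => l ++ [image])

def organize_images_by_type (images : List (List (String × String))) : List (String × List (List (String × String))) :=
  (images.foldl orgStepA (PySem.Dict.ofList [("thermal", []), ("structural", []), ("moisture", []), ("other", [])])).items

-- ===== PORT B =====
def orgRules : List (String × List String) :=
  [("thermal", ["thermal"]), ("structural", ["crack", "structural"]), ("moisture", ["water", "moisture", "damp"])]

-- next((cat for cat, kws in rules if any(k in desc for k in kws)), "other")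
def orgCategory (image : List (String × String)) : String :=
  let desc := orgDesc image
  match orgRules.find? (fun r => r.2.any (fun k => PySem.Str.isIn k desc)) with
  | some r => r.1
  | none => "other"

def organize_images_by_type_alt (images : List (List (String × String))) : List (String × List (List (String × String))) :=
  ["thermal", "structural", "moisture", "other"].map
    (fun cat => (cat, images.filter (fun img => orgCategory img == cat)))

-- ===== PRECONDITION & SPEC =====
def Spec_organize_images_by_type (images : List (List (String × String))) (out : List (String × List (List (String × String)))) : Prop := out = organize_images_by_type_alt images
instance (images : List (List (String × String))) (out : List (String × List (List (String × String)))) : Decidable (Spec_organize_images_by_type images out) := by unfold Spec_organize_images_by_type; infer_instance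

-- ===== CLAIM (what is proved, stated in full; the proofs are below) =====
def Claim_equal_organize_images_by_type : Prop := ∀ (images : List (List (String × String))), Dom_organize_images_by_type images → Spec_organize_images_by_type images (organize_images_by_type images)

-- ===== LEMMAS AND PROOFS =====

theorem cat_thermal (img : List (String × String)) (h : PySem.Str.isIn "thermal" (orgDesc img) = true) :
    orgCategory img = "thermal" := by
  simp [PySem.Str.isIn] at h
  simp [orgCategory, orgRules, h]

theorem cat_structural (img : List (String × String)) (h1 : PySem.Str.isIn "thermal" (orgDesc img) = false)
    (h2 : (PySem.Str.isIn "crack" (orgDesc img) || PySem.Str.isIn "structural" (orgDesc img)) = true) :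
    orgCategory img = "structural" := by
  simp [PySem.Str.isIn] at h1 h2
  rcases h2 with h | h <;> simp [orgCategory, orgRules, h1, h]

theorem cat_moisture (img : List (String × String)) (h1 : PySem.Str.isIn "thermal" (orgDesc img) = false)
    (h2 : (PySem.Str.isIn "crack" (orgDesc img) || PySem.Str.isIn "structural" (orgDesc img)) = false)
    (h4 : (PySem.Str.isIn "water" (orgDesc img) || PySem.Str.isIn "moisture" (orgDesc img) || PySem.Str.isIn "damp" (orgDesc img)) = true) :
    orgCategory img = "moisture" := by
  simp [PySem.Str.isIn] at h1 h2 h4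
  rcases h4 with (h | h) | h <;> simp [orgCategory, orgRules, h1, h2.1, h2.2, h]

theorem cat_other (img : List (String × String)) (h1 : PySem.Str.isIn "thermal" (orgDesc img) = false)
    (h2 : (PySem.Str.isIn "crack" (orgDesc img) || PySem.Str.isIn "structural" (orgDesc img)) = false)
    (h4 : (PySem.Str.isIn "water" (orgDesc img) || PySem.Str.isIn "moisture" (orgDesc img) || PySem.Str.isIn "damp" (orgDesc img)) = false) :
    orgCategory img = "other" := by
  simp [PySem.Str.isIn] at h1 h2 h4
  simp [orgCategory, orgRules, h1, h2.1, h2.2, h4.1.1, h4.1.2, h4.2]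

theorem stepA_thermal (t s m o : List (List (String × String))) (img : List (String × String))
    (h : PySem.Str.isIn "thermal" (orgDesc img) = true) :
    orgStepA (PySem.Dict.mk [("thermal", t), ("structural", s), ("moisture", m), ("other", o)]) img =
      PySem.Dict.mk [("thermal", t ++ [img]), ("structural", s), ("moisture", m), ("other", o)] := by
  simp only [orgStepA, h, if_true]; rfl

theorem stepA_structural (t s m o : List (List (String × String))) (img : List (String × String))
    (h1 : PySem.Str.isIn "thermal" (orgDesc img) = false)
    (h2 : (PySem.Str.isIn "crack" (orgDesc img) || PySem.Str.isIn "structural" (orgDesc img)) = true) :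
    orgStepA (PySem.Dict.mk [("thermal", t), ("structural", s), ("moisture", m), ("other", o)]) img =
      PySem.Dict.mk [("thermal", t), ("structural", s ++ [img]), ("moisture", m), ("other", o)] := by
  simp only [orgStepA, h1, h2, Bool.false_eq_true, if_false, if_true]; rfl

theorem stepA_moisture (t s m o : List (List (String × String))) (img : List (String × String))
    (h1 : PySem.Str.isIn "thermal" (orgDesc img) = false)
    (h2 : (PySem.Str.isIn "crack" (orgDesc img) || PySem.Str.isIn "structural" (orgDesc img)) = false)
    (h4 : (PySem.Str.isIn "water" (orgDesc img) || PySem.Str.isIn "moisture" (orgDesc img) || PySem.Str.isIn "damp" (orgDesc img)) = true) :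
    orgStepA (PySem.Dict.mk [("thermal", t), ("structural", s), ("moisture", m), ("other", o)]) img =
      PySem.Dict.mk [("thermal", t), ("structural", s), ("moisture", m ++ [img]), ("other", o)] := by
  simp only [orgStepA, h1, h2, h4, Bool.false_eq_true, if_false, if_true]; rfl

theorem stepA_other (t s m o : List (List (String × String))) (img : List (String × String))
    (h1 : PySem.Str.isIn "thermal" (orgDesc img) = false)
    (h2 : (PySem.Str.isIn "crack" (orgDesc img) || PySem.Str.isIn "structural" (orgDesc img)) = false)
    (h4 : (PySem.Str.isIn "water" (orgDesc img) || PySem.Str.isIn "moisture" (orgDesc img) || PySem.Str.isIn "damp" (orgDesc img)) = false) :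
    orgStepA (PySem.Dict.mk [("thermal", t), ("structural", s), ("moisture", m), ("other", o)]) img =
      PySem.Dict.mk [("thermal", t), ("structural", s), ("moisture", m), ("other", o ++ [img])] := by
  simp only [orgStepA, h1, h2, h4, Bool.false_eq_true, if_false]; rfl

theorem org_inv (images : List (List (String × String))) :
    ∀ t s m o : List (List (String × String)),
      images.foldl orgStepA (PySem.Dict.mk [("thermal", t), ("structural", s), ("moisture", m), ("other", o)]) =
        PySem.Dict.mk [("thermal", t ++ images.filter (fun i => orgCategory i == "thermal")),
                       ("structural", s ++ images.filter (fun i => orgCategory i == "structural")),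
                       ("moisture", m ++ images.filter (fun i => orgCategory i == "moisture")),
                       ("other", o ++ images.filter (fun i => orgCategory i == "other"))] := by
  induction images with
  | nil => intro t s m o; simp
  | cons img rest ih =>
    intro t s m o
    simp only [List.foldl_cons]
    by_cases h1 : PySem.Str.isIn "thermal" (orgDesc img) = true
    · rw [stepA_thermal t s m o img h1, ih]
      simp [List.filter_cons, cat_thermal img h1]
    · rw [Bool.not_eq_true] at h1
      by_cases h2 : (PySem.Str.isIn "crack" (orgDesc img) || PySem.Str.isIn "structural" (orgDesc img)) = true
      · rw [stepA_structural t s m o img h1 h2, ih]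
        simp [List.filter_cons, cat_structural img h1 h2]
      · rw [Bool.not_eq_true] at h2
        by_cases h4 : (PySem.Str.isIn "water" (orgDesc img) || PySem.Str.isIn "moisture" (orgDesc img) || PySem.Str.isIn "damp" (orgDesc img)) = true
        · rw [stepA_moisture t s m o img h1 h2 h4, ih]
          simp [List.filter_cons, cat_moisture img h1 h2 h4]
        · rw [Bool.not_eq_true] at h4
          rw [stepA_other t s m o img h1 h2 h4, ih]
          simp [List.filter_cons, cat_other img h1 h2 h4]

-- ===== VERDICT (by name: the statement is the Claim_ definition above) =====
theorem organize_images_by_type_spec : Claim_equal_organize_images_by_type := by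
  intro images _
  unfold Spec_organize_images_by_type organize_images_by_type organize_images_by_type_alt
  rw [show (PySem.Dict.ofList [("thermal", ([] : List (List (String × String)))), ("structural", []), ("moisture", []), ("other", [])]) =
        PySem.Dict.mk [("thermal", []), ("structural", []), ("moisture", []), ("other", [])] from rfl,
      org_inv]
  simp [PySem.Dict.items]
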